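-- pv_equiv track=rewrite | github.com/shollingsworth/freeplane_tools | scripts/genbadges.py | badges
-- ===== SOURCE A (Python) =====
-- keymap = {
--     "github-stars": "stargazers",
--     "github-forks": "network/members",
--     "github-issues": "issues",
-- }
--
-- def badges(github, pkgname):
--     urls = [
--         f"https://img.shields.io/github/stars/{github}",
--         f"https://img.shields.io/github/forks/{github}",
--         f"https://img.shields.io/github/issues/{github}",
--         f"https://img.shields.io/pypi/v/{pkgname}",
--         f"https://img.shields.io/pypi/l/{pkgname}",
--         f"https://img.shields.io/pypi/status/{pkgname}",
--         f"https://img.shields.io/pypi/dm/{pkgname}",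
--         f"https://img.shields.io/pypi/pyversions/{pkgname}",
--         f"https://img.shields.io/pypi/implementation/{pkgname}",
--     ]
--     for i in urls:
--         arr = i.split("/")
--         key = "-".join(arr[3:5])
--         if "github" in key:
--             if key in keymap:
--                 url = f"https://github.com/{github}/{keymap[key]}"
--             else:
--                 url = f"https://github.com/{github}"
--         elif "pypi" in key:
--             url = f"https://pypi.org/project/{pkgname}"
--         else:
--             raise RuntimeError(f"Unkown key: {key}")
--         md = f'[![{key}]({i} "{key}")]({url}) '
--         yield md
-- ===== SOURCE B (Python) =====
-- keymap = {
--     "github-stars": "stargazers",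
--     "github-forks": "network/members",
--     "github-issues": "issues",
-- }
--
-- def badges(github, pkgname):
--     gh = f"https://github.com/{github}"
--     pp = f"https://pypi.org/project/{pkgname}"
--     table = [
--         ("github-stars", f"https://img.shields.io/github/stars/{github}", f"{gh}/stargazers"),
--         ("github-forks", f"https://img.shields.io/github/forks/{github}", f"{gh}/network/members"),
--         ("github-issues", f"https://img.shields.io/github/issues/{github}", f"{gh}/issues"),
--         ("pypi-v", f"https://img.shields.io/pypi/v/{pkgname}", pp),
--         ("pypi-l", f"https://img.shields.io/pypi/l/{pkgname}", pp),
--         ("pypi-status", f"https://img.shields.io/pypi/status/{pkgname}", pp),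
--         ("pypi-dm", f"https://img.shields.io/pypi/dm/{pkgname}", pp),
--         ("pypi-pyversions", f"https://img.shields.io/pypi/pyversions/{pkgname}", pp),
--         ("pypi-implementation", f"https://img.shields.io/pypi/implementation/{pkgname}", pp),
--     ]
--     for key, img, link in table:
--         yield f'[![{key}]({img} "{key}")]({link}) '
-- ===== Notes on version B (the rewrite author's own statement) =====
-- stated objective: simpler
-- what changed: B replaces A's build-URLs-then-reparse pipeline (split each URL on '/', rejoin parts 3:5 into a key, dispatch on substring tests and a keymap lookup) with a direct literal table of (key, image-url, link-url) triples iterated in order.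
import Mathlib
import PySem

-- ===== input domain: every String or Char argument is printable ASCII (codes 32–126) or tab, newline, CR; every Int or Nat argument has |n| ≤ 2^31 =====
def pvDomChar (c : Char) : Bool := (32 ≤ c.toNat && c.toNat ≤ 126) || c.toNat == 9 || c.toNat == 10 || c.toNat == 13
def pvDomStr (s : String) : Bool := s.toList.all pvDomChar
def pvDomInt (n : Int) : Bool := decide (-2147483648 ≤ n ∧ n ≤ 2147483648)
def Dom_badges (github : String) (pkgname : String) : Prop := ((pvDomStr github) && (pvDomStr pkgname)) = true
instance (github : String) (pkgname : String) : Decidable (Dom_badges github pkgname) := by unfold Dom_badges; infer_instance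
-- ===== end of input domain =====

-- B replaces A's build-URLs-then-reparse pipeline with a direct table of (key, image-url, link-url)
-- triples; objective: simpler. (Python A is a generator; the List String is its yielded sequence.)

-- ===== PORT A =====
-- the module-level 'keymap' dict
def pvKeymapA : PySem.Dict String String :=
  ((PySem.Dict.empty.insert "github-stars" "stargazers").insert
      "github-forks" "network/members").insert "github-issues" "issues"

def badges (github : String) (pkgname : String) : List String :=
  let urls : List String :=
    [ "https://img.shields.io/github/stars/" ++ github,
      "https://img.shields.io/github/forks/" ++ github,
      "https://img.shields.io/github/issues/" ++ github,
      "https://img.shields.io/pypi/v/" ++ pkgname,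
      "https://img.shields.io/pypi/l/" ++ pkgname,
      "https://img.shields.io/pypi/status/" ++ pkgname,
      "https://img.shields.io/pypi/dm/" ++ pkgname,
      "https://img.shields.io/pypi/pyversions/" ++ pkgname,
      "https://img.shields.io/pypi/implementation/" ++ pkgname ]
  urls.foldl (fun acc i =>
    let arr : List String := (PySem.Str.split? i "/").getD []
    let key : String := PySem.Str.join "-" (PySem.List.slice arr (some 3) (some 5))
    let url : String :=
      if PySem.Str.isIn "github" key then
        if pvKeymapA.contains key then
          "https://github.com/" ++ github ++ "/" ++ pvKeymapA.getD key ""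
        else
          "https://github.com/" ++ github
      else if PySem.Str.isIn "pypi" key then
        "https://pypi.org/project/" ++ pkgname
      else
        ""  -- Python: raise RuntimeError; dead branch — key is always one of the nine fixed keys
    acc ++ ["[![" ++ key ++ "](" ++ i ++ " \"" ++ key ++ "\")](" ++ url ++ ") "]) []

-- ===== PORT B =====
def badges_alt (github : String) (pkgname : String) : List String :=
  let gh : String := "https://github.com/" ++ github
  let pp : String := "https://pypi.org/project/" ++ pkgname
  let table : List (String × String × String) :=
    [ ("github-stars", "https://img.shields.io/github/stars/" ++ github, gh ++ "/stargazers"),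
      ("github-forks", "https://img.shields.io/github/forks/" ++ github, gh ++ "/network/members"),
      ("github-issues", "https://img.shields.io/github/issues/" ++ github, gh ++ "/issues"),
      ("pypi-v", "https://img.shields.io/pypi/v/" ++ pkgname, pp),
      ("pypi-l", "https://img.shields.io/pypi/l/" ++ pkgname, pp),
      ("pypi-status", "https://img.shields.io/pypi/status/" ++ pkgname, pp),
      ("pypi-dm", "https://img.shields.io/pypi/dm/" ++ pkgname, pp),
      ("pypi-pyversions", "https://img.shields.io/pypi/pyversions/" ++ pkgname, pp),
      ("pypi-implementation", "https://img.shields.io/pypi/implementation/" ++ pkgname, pp) ]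
  table.map (fun t => "[![" ++ t.1 ++ "](" ++ t.2.1 ++ " \"" ++ t.1 ++ "\")](" ++ t.2.2 ++ ") ")

-- ===== PRECONDITION & SPEC =====
def Spec_badges (github : String) (pkgname : String) (out : List String) : Prop := out = badges_alt github pkgname
instance (github : String) (pkgname : String) (out : List String) : Decidable (Spec_badges github pkgname out) := by unfold Spec_badges; infer_instance

-- ===== CLAIM (what is proved, stated in full; the proofs are below) =====
def Claim_equal_badges : Prop := ∀ (github : String) (pkgname : String), Dom_badges github pkgname → Spec_badges github pkgname (badges github pkgname)

-- ===== LEMMAS AND PROOFS =====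

theorem go_acc (sep : List Char) (f : Nat) : ∀ (l cur : List Char) (acc : List (List Char)),
    PySem.Chars.splitOn.go sep f l cur acc = acc.reverse ++ PySem.Chars.splitOn.go sep f l cur [] := by
  induction f with
  | zero => intro l cur acc; cases l <;> simp [PySem.Chars.splitOn.go]
  | succ f ih =>
    intro l cur acc
    cases l with
    | nil => simp [PySem.Chars.splitOn.go]
    | cons c rest =>
      simp only [PySem.Chars.splitOn.go]
      split
      · rw [ih _ [] (cur.reverse :: acc), ih _ [] [cur.reverse]]; simp
      · exact ih _ _ _

theorem go_chunk (p : List Char) (hp : '/' ∉ p) : ∀ (f : Nat) (l cur : List Char) (acc : List (List Char)),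
    PySem.Chars.splitOn.go ['/'] (f + p.length) (p ++ l) cur acc
      = PySem.Chars.splitOn.go ['/'] f l (p.reverse ++ cur) acc := by
  induction p with
  | nil => intro f l cur acc; simp
  | cons c p ih =>
    intro f l cur acc
    have hc : c ≠ '/' := fun h => hp (h ▸ List.mem_cons_self ..)
    have hpre : ['/'].isPrefixOf (c :: (p ++ l)) = false := by
      simp [List.isPrefixOf]; exact fun h => absurd h.symm hc
    have harith : f + (c :: p).length = (f + p.length) + 1 := by simp; omega
    rw [harith]
    show PySem.Chars.splitOn.go ['/'] ((f + p.length) + 1) (c :: (p ++ l)) cur acc = _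
    simp only [PySem.Chars.splitOn.go, hpre]
    rw [ih (hp <| List.mem_cons_of_mem _ ·) f l (c :: cur) acc]
    simp

theorem go_slash (f : Nat) (l cur : List Char) (acc : List (List Char)) :
    PySem.Chars.splitOn.go ['/'] (f + 1) ('/' :: l) cur acc
      = PySem.Chars.splitOn.go ['/'] f l [] (cur.reverse :: acc) := by
  simp [PySem.Chars.splitOn.go, List.isPrefixOf]

theorem splitOn_chunk (p g : List Char) (hp : '/' ∉ p) :
    PySem.Chars.splitOn (p ++ '/' :: g) ['/'] = p :: PySem.Chars.splitOn g ['/'] := by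
  show PySem.Chars.splitOn.go ['/'] ((p ++ '/' :: g).length + 1) (p ++ '/' :: g) [] [] = _
  have harith : (p ++ '/' :: g).length + 1 = ((g.length + 1) + 1) + p.length := by simp; omega
  rw [harith, go_chunk p hp, go_slash, go_acc]
  simp [PySem.Chars.splitOn]

theorem split_shape (s1 s2 g : List Char) (h1 : '/' ∉ s1) (h2 : '/' ∉ s2) :
    PySem.Chars.splitOn
        ("https:".toList ++ '/' :: ([] ++ '/' :: ("img.shields.io".toList ++ '/' :: (s1 ++ '/' :: (s2 ++ '/' :: g))))) ['/']
      = ["https:".toList, [], "img.shields.io".toList, s1, s2] ++ PySem.Chars.splitOn g ['/'] := by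
  rw [splitOn_chunk _ _ (by decide), splitOn_chunk _ _ (by decide),
      splitOn_chunk _ _ (by decide), splitOn_chunk _ _ h1, splitOn_chunk _ _ h2]
  rfl

theorem keyA (pre : String) (s1 s2 : List Char) (tail : String)
    (h1 : '/' ∉ s1) (h2 : '/' ∉ s2)
    (hshape : (pre ++ tail).toList
      = "https:".toList ++ '/' :: ([] ++ '/' :: ("img.shields.io".toList ++ '/' :: (s1 ++ '/' :: (s2 ++ '/' :: tail.toList))))) :
    PySem.Str.join "-" (PySem.List.slice ((PySem.Str.split? (pre ++ tail) "/").getD []) (some 3) (some 5))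
      = String.ofList (s1 ++ '-' :: s2) := by
  have hsplit : (PySem.Str.split? (pre ++ tail) "/").getD []
      = ([ "https:".toList, [], "img.shields.io".toList, s1, s2 ].map String.ofList)
        ++ (PySem.Chars.splitOn tail.toList ['/']).map String.ofList := by
    simp only [PySem.Str.split?, PySem.Chars.split?]
    rw [show ("/" : String).toList = ['/'] from rfl, hshape, split_shape s1 s2 _ h1 h2]
    simp
  rw [hsplit]
  simp only [List.map_cons, List.map_nil]
  simp [PySem.List.slice, PySem.List.clampIdx, PySem.Str.join, PySem.Chars.join,
        List.intercalate]

-- ===== VERDICT (by name: the statement is the Claim_ definition above) =====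
theorem badges_spec : Claim_equal_badges := by
  intro g p _
  show badges g p = badges_alt g p
  have k1 : PySem.Str.join "-" (PySem.List.slice ((PySem.Str.split? ("https://img.shields.io/github/stars/" ++ g) "/").getD []) (some 3) (some 5)) = "github-stars" :=
    (keyA _ "github".toList "stars".toList g (by decide) (by decide) (by rw [String.toList_append]; rfl)).trans (by decide)
  have k2 : PySem.Str.join "-" (PySem.List.slice ((PySem.Str.split? ("https://img.shields.io/github/forks/" ++ g) "/").getD []) (some 3) (some 5)) = "github-forks" :=
    (keyA _ "github".toList "forks".toList g (by decide) (by decide) (by rw [String.toList_append]; rfl)).trans (by decide)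
  have k3 : PySem.Str.join "-" (PySem.List.slice ((PySem.Str.split? ("https://img.shields.io/github/issues/" ++ g) "/").getD []) (some 3) (some 5)) = "github-issues" :=
    (keyA _ "github".toList "issues".toList g (by decide) (by decide) (by rw [String.toList_append]; rfl)).trans (by decide)
  have k4 : PySem.Str.join "-" (PySem.List.slice ((PySem.Str.split? ("https://img.shields.io/pypi/v/" ++ p) "/").getD []) (some 3) (some 5)) = "pypi-v" :=
    (keyA _ "pypi".toList "v".toList p (by decide) (by decide) (by rw [String.toList_append]; rfl)).trans (by decide)
  have k5 : PySem.Str.join "-" (PySem.List.slice ((PySem.Str.split? ("https://img.shields.io/pypi/l/" ++ p) "/").getD []) (some 3) (some 5)) = "pypi-l" :=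
    (keyA _ "pypi".toList "l".toList p (by decide) (by decide) (by rw [String.toList_append]; rfl)).trans (by decide)
  have k6 : PySem.Str.join "-" (PySem.List.slice ((PySem.Str.split? ("https://img.shields.io/pypi/status/" ++ p) "/").getD []) (some 3) (some 5)) = "pypi-status" :=
    (keyA _ "pypi".toList "status".toList p (by decide) (by decide) (by rw [String.toList_append]; rfl)).trans (by decide)
  have k7 : PySem.Str.join "-" (PySem.List.slice ((PySem.Str.split? ("https://img.shields.io/pypi/dm/" ++ p) "/").getD []) (some 3) (some 5)) = "pypi-dm" :=
    (keyA _ "pypi".toList "dm".toList p (by decide) (by decide) (by rw [String.toList_append]; rfl)).trans (by decide)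
  have k8 : PySem.Str.join "-" (PySem.List.slice ((PySem.Str.split? ("https://img.shields.io/pypi/pyversions/" ++ p) "/").getD []) (some 3) (some 5)) = "pypi-pyversions" :=
    (keyA _ "pypi".toList "pyversions".toList p (by decide) (by decide) (by rw [String.toList_append]; rfl)).trans (by decide)
  have k9 : PySem.Str.join "-" (PySem.List.slice ((PySem.Str.split? ("https://img.shields.io/pypi/implementation/" ++ p) "/").getD []) (some 3) (some 5)) = "pypi-implementation" :=
    (keyA _ "pypi".toList "implementation".toList p (by decide) (by decide) (by rw [String.toList_append]; rfl)).trans (by decide)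
  simp only [badges, badges_alt, List.foldl_cons, List.foldl_nil, List.map_cons, List.map_nil,
             List.nil_append, List.cons_append]
  rw [k1, k2, k3, k4, k5, k6, k7, k8, k9]
  norm_num [show PySem.Chars.isIn "github".toList "github-stars".toList = true from by decide,
            show PySem.Chars.isIn "github".toList "github-forks".toList = true from by decide,
            show PySem.Chars.isIn "github".toList "github-issues".toList = true from by decide,
            show PySem.Chars.isIn "github".toList "pypi-v".toList = false from by decide,
            show PySem.Chars.isIn "github".toList "pypi-l".toList = false from by decide,
            show PySem.Chars.isIn "github".toList "pypi-status".toList = false from by decide,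
            show PySem.Chars.isIn "github".toList "pypi-dm".toList = false from by decide,
            show PySem.Chars.isIn "github".toList "pypi-pyversions".toList = false from by decide,
            show PySem.Chars.isIn "github".toList "pypi-implementation".toList = false from by decide,
            show PySem.Chars.isIn "pypi".toList "pypi-v".toList = true from by decide,
            show PySem.Chars.isIn "pypi".toList "pypi-l".toList = true from by decide,
            show PySem.Chars.isIn "pypi".toList "pypi-status".toList = true from by decide,
            show PySem.Chars.isIn "pypi".toList "pypi-dm".toList = true from by decide,
            show PySem.Chars.isIn "pypi".toList "pypi-pyversions".toList = true from by decide,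
            show PySem.Chars.isIn "pypi".toList "pypi-implementation".toList = true from by decide,
            show pvKeymapA.contains "github-stars" = true from by decide,
            show pvKeymapA.contains "github-forks" = true from by decide,
            show pvKeymapA.contains "github-issues" = true from by decide,
            show pvKeymapA.getD "github-stars" "" = "stargazers" from by decide,
            show pvKeymapA.getD "github-forks" "" = "network/members" from by decide,
            show pvKeymapA.getD "github-issues" "" = "issues" from by decide]
  and_intros <;> (apply String.toList_inj.mp; simp only [String.toList_append, List.append_assoc]; rfl)
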